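-- pv_equiv track=rewrite | github.com/cwb14/LTR_HARVEST_parallel | cluster_LTRs.py | cluster_by_chrom
-- ===== SOURCE A (Python) =====
-- def cluster_by_chrom(records):
--     """
--     records: list of (orig_index, chrom, start, end, line)
--     Returns list of clusters:
--       [ [ (orig_index, chrom, start, end, line), ... ], ... ]
--     Clusters ordered by the first appearance (lowest orig_index) among their members.
--     """
--     from collections import defaultdict
--
--     chrom_map = defaultdict(list)
--     for rec in records:
--         chrom_map[rec[1]].append(rec)
--
--     all_clusters = []
--
--     for chrom, recs in chrom_map.items():
--         # sort by start for merging to find overlapping/transitive groups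
--         recs_sorted = sorted(recs, key=lambda r: (r[2], r[3]))
--         i = 0
--         n = len(recs_sorted)
--         while i < n:
--             # start a new cluster with recs_sorted[i]
--             cluster_members = [recs_sorted[i]]
--             cur_end = recs_sorted[i][3]
--             i += 1
--             # extend cluster by any recs whose start <= cur_end (transitive merging)
--             while i < n and recs_sorted[i][2] <= cur_end:
--                 cluster_members.append(recs_sorted[i])
--                 if recs_sorted[i][3] > cur_end:
--                     cur_end = recs_sorted[i][3]
--                 i += 1
--
--             # restore original input order inside the cluster
--             cluster_members_sorted_by_input = sorted(cluster_members, key=lambda r: r[0])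
--             all_clusters.append(cluster_members_sorted_by_input)
--
--     # Sort clusters across chromosomes by first original index for deterministic output
--     all_clusters.sort(key=lambda cl: cl[0][0] if cl else float('inf'))
--     return all_clusters
-- ===== SOURCE B (Python) =====
-- def cluster_by_chrom(records):
--     """
--     records: list of (orig_index, chrom, start, end, line)
--     Sweep-line re-implementation: per chromosome, sort (start, type, end)
--     events and track an open-interval depth counter; a cluster is finalized
--     whenever the depth returns to zero.  A record whose end precedes its
--     start carries a single point event: it joins the cluster open at its
--     start, or stands alone.
--     """
--     all_clusters = []
--     for chrom in dict.fromkeys(r[1] for r in records):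
--         recs = sorted((r for r in records if r[1] == chrom),
--                       key=lambda r: (r[2], r[3]))
--         events = []
--         for r in recs:
--             if r[2] <= r[3]:
--                 events.append((r[2], 0, r))
--                 events.append((r[3], 1, r))
--             else:
--                 events.append((r[2], -1, r))
--         events.sort(key=lambda e: (e[0], e[1]))
--         depth = 0
--         cur = []
--         for _, typ, r in events:
--             if typ == -1:
--                 if depth > 0:
--                     cur.append(r)
--                 else:
--                     all_clusters.append([r])
--             elif typ == 0:
--                 cur.append(r)
--                 depth += 1
--             else:
--                 depth -= 1
--                 if depth == 0:
--                     all_clusters.append(cur)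
--                     cur = []
--     all_clusters = [sorted(c, key=lambda r: r[0]) for c in all_clusters]
--     all_clusters.sort(key=lambda c: c[0][0])
--     return all_clusters
-- ===== Notes on version B (the rewrite author's own statement) =====
-- stated objective: alternative
-- what changed: Per chromosome, A's index-based while loop that extends a cluster while the next sorted start is <= the running max end is replaced by a sweep line: emit (coord, type) start/end events (a single point event for end<start records), sort them with starts before ends at equal coordinates, and cut clusters where an open-interval depth counter returns to zero.
import Mathlib
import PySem

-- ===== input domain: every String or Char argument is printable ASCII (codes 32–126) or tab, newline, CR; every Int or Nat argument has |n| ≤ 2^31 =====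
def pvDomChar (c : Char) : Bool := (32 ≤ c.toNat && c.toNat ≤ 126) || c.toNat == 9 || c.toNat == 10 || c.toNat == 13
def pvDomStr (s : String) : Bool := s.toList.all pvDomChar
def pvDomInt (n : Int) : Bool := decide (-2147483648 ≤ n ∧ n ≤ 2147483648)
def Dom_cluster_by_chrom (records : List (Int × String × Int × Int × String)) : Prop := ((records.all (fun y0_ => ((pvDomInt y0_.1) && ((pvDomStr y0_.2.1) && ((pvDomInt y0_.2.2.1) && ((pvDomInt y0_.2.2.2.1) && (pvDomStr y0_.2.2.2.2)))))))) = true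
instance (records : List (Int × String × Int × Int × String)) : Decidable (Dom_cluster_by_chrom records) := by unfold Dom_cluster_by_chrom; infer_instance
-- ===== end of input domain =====

-- B replaces A's per-chromosome sort-and-extend merge loop by a sweep line over (coord, typ)
-- events with a depth counter (objective: alternative algorithm, same asymptotic cost).

abbrev PvR : Type := Int × String × Int × Int × String
abbrev PvEv : Type := Int × Int × PvR

-- ===== PORT A =====
-- A's inner while loop: extend the cluster while the next start is ≤ cur_end;
-- state = (cluster members so far, cur_end, remaining sorted records).
def growA : List PvR → Int → List PvR → (List PvR × Int × List PvR)
  | [], e, acc => (acc, e, [])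
  | y :: ys, e, acc =>
    if y.2.2.1 ≤ e then
      growA ys (if y.2.2.2.1 > e then y.2.2.2.1 else e) (acc ++ [y])
    else (acc, e, y :: ys)

theorem growA_rest_length : ∀ (rs : List PvR) (e : Int) (acc : List PvR),
    (growA rs e acc).2.2.length ≤ rs.length := by
  intro rs
  induction rs with
  | nil => intro e acc; simp [growA]
  | cons y ys ih =>
    intro e acc
    simp only [growA]
    split
    · exact le_trans (ih _ _) (by simp)
    · simp

def mergeA (rs : List PvR) : List (List PvR) :=
  match rs with
  | [] => []
  | x :: xs =>
    let g := growA xs x.2.2.2.1 [x]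
    PySem.List.sorted g.1 (fun r => r.1) :: mergeA g.2.2
termination_by rs.length
decreasing_by
  simpa using Nat.lt_succ_of_le (growA_rest_length xs x.2.2.2.1 [x])

def cluster_by_chrom (records : List (Int × String × Int × Int × String)) : List (List (Int × String × Int × Int × String)) :=
  let chromMap := records.foldl (fun d r => d.modify r.2.1 [] (fun l => l ++ [r])) PySem.Dict.empty
  let all_clusters := chromMap.items.foldl
    (fun acc p => acc ++ mergeA (PySem.List.sorted2 p.2 (fun r => r.2.2.1) (fun r => r.2.2.2.1))) []
  PySem.List.sorted all_clusters (fun cl => match cl with | [] => 0 | r :: _ => r.1)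

-- ===== PORT B =====
-- one sweep step over an event (coord, typ, rec); state = (clusters, cur, depth)
def sweepB (s : List (List PvR) × List PvR × Int) (e : PvEv) :
    List (List PvR) × List PvR × Int :=
  if e.2.1 = -1 then
    (if 0 < s.2.2 then (s.1, s.2.1 ++ [e.2.2], s.2.2) else (s.1 ++ [[e.2.2]], s.2.1, s.2.2))
  else if e.2.1 = 0 then (s.1, s.2.1 ++ [e.2.2], s.2.2 + 1)
  else
    let d := s.2.2 - 1
    if d = 0 then (s.1 ++ [s.2.1], [], d) else (s.1, s.2.1, d)

-- body of B's `for chrom in …` loop: sort records, build events, sort events by (coord, typ), sweep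
def chromB (recs : List PvR) : List (List PvR) :=
  let rs := PySem.List.sorted2 recs (fun r => r.2.2.1) (fun r => r.2.2.2.1)
  let events := rs.foldl
    (fun acc r =>
      if r.2.2.1 ≤ r.2.2.2.1 then acc ++ [(r.2.2.1, 0, r)] ++ [(r.2.2.2.1, 1, r)]
      else acc ++ [(r.2.2.1, -1, r)]) []
  let es := PySem.List.sorted2 events (fun e => e.1) (fun e => e.2.1)
  (es.foldl sweepB ([], [], 0)).1

def cluster_by_chrom_alt (records : List (Int × String × Int × Int × String)) : List (List (Int × String × Int × Int × String)) :=
  let all0 := (PySem.List.dedup (records.map (fun r => r.2.1))).foldl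
    (fun acc c => acc ++ chromB (records.filter (fun r => r.2.1 == c))) []
  let all1 := all0.map (fun c => PySem.List.sorted c (fun r => r.1))
  PySem.List.sorted all1 (fun cl => match cl with | [] => 0 | r :: _ => r.1)

-- ===== PRECONDITION & SPEC =====
def Spec_cluster_by_chrom (records : List (Int × String × Int × Int × String)) (out : List (List (Int × String × Int × Int × String))) : Prop := out = cluster_by_chrom_alt records
instance (records : List (Int × String × Int × Int × String)) (out : List (List (Int × String × Int × Int × String))) : Decidable (Spec_cluster_by_chrom records out) := by unfold Spec_cluster_by_chrom; infer_instance

-- ===== CLAIM (what is proved, stated in full; the proofs are below) =====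
def Claim_equal_cluster_by_chrom : Prop := ∀ (records : List (Int × String × Int × Int × String)), Dom_cluster_by_chrom records → Spec_cluster_by_chrom records (cluster_by_chrom records)

-- ===== LEMMAS AND PROOFS =====

-- comparison used by sorted2 on records / events
def bfR (a b : PvR) : Bool := decide (a.2.2.1 < b.2.2.1) || (!decide (b.2.2.1 < a.2.2.1) && decide (a.2.2.2.1 < b.2.2.2.1))
def bfE (a b : PvEv) : Bool := decide (a.1 < b.1) || (!decide (b.1 < a.1) && decide (a.2.1 < b.2.1))

theorem insertBy_eq_takeWhile {α : Type} (bf : α → α → Bool) (x : α) (l : List α) :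
    PySem.List.insertBy bf x l =
      l.takeWhile (fun a => !bf x a) ++ x :: l.dropWhile (fun a => !bf x a) := by
  induction l with
  | nil => rfl
  | cons y ys ih =>
    by_cases h : bf x y = true
    · simp [PySem.List.insertBy, h]
    · simp only [Bool.not_eq_true] at h
      simp [PySem.List.insertBy, h, ih]

theorem mem_foldl_insertBy {α : Type} (bf : α → α → Bool) (l t : List α) (a : α) :
    a ∈ l.foldl (fun acc x => PySem.List.insertBy bf x acc) t ↔ a ∈ t ∨ a ∈ l := by
  induction l generalizing t with
  | nil => simp
  | cons y ys ih =>
    simp only [List.foldl_cons, ih, PySem.List.mem_insertBy, List.mem_cons]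
    tauto

theorem insertBy_append_left {α : Type} (bf : α → α → Bool) (x : α) (s t : List α)
    (h : ∀ a ∈ s, bf x a = false) :
    PySem.List.insertBy bf x (s ++ t) = s ++ PySem.List.insertBy bf x t := by
  induction s with
  | nil => rfl
  | cons a s ih =>
    have ha : bf x a = false := h a (by simp)
    simp only [List.cons_append, PySem.List.insertBy, ha]
    simp [ih (fun b hb => h b (by simp [hb]))]

theorem foldl_insertBy_append_left {α : Type} (bf : α → α → Bool) (l s t : List α)
    (h : ∀ b ∈ l, ∀ a ∈ s, bf b a = false) :
    l.foldl (fun acc x => PySem.List.insertBy bf x acc) (s ++ t) =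
      s ++ l.foldl (fun acc x => PySem.List.insertBy bf x acc) t := by
  induction l generalizing t with
  | nil => rfl
  | cons y ys ih =>
    simp only [List.foldl_cons]
    rw [insertBy_append_left bf y s t (h y (by simp)),
        ih _ (fun b hb a ha => h b (by simp [hb]) a ha)]

-- stable-sort split: if every element of l1 key-≤ every element of l2 the sort concatenates
theorem sortFold_append {α : Type} (bf : α → α → Bool) (l1 l2 : List α)
    (h : ∀ b ∈ l2, ∀ a ∈ l1, bf b a = false) :
    (l1 ++ l2).foldl (fun acc x => PySem.List.insertBy bf x acc) [] =
      l1.foldl (fun acc x => PySem.List.insertBy bf x acc) [] ++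
      l2.foldl (fun acc x => PySem.List.insertBy bf x acc) [] := by
  rw [List.foldl_append]
  have := foldl_insertBy_append_left bf l2
      (l1.foldl (fun acc x => PySem.List.insertBy bf x acc) []) []
      (fun b hb a ha => h b hb a ((mem_foldl_insertBy bf l1 [] a).mp ha |>.resolve_left (by simp)))
  simpa using this

theorem dropWhile_all_bf {α : Type} (bf : α → α → Bool)
    (h4 : ∀ a b c, bf a b = true → bf c b = false → bf a c = true) (x : α) :
    ∀ l : List α, l.Pairwise (fun a b => bf b a = false) →
      ∀ e ∈ l.dropWhile (fun a => !bf x a), bf x e = true := by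
  intro l
  induction l with
  | nil => simp
  | cons y ys ih =>
    intro hp e he
    rw [List.pairwise_cons] at hp
    by_cases hxy : bf x y = true
    · rw [List.dropWhile_cons_of_neg (by simp [hxy])] at he
      rcases List.mem_cons.mp he with rfl | he
      · exact hxy
      · exact h4 x y e hxy (hp.1 e he)
    · rw [List.dropWhile_cons_of_pos (by simp [Bool.not_eq_true] at hxy ⊢; exact hxy)] at he
      exact ih hp.2 e he

theorem insertBy_pairwise {α : Type} (bf : α → α → Bool)
    (h4 : ∀ a b c, bf a b = true → bf c b = false → bf a c = true)
    (hA : ∀ a b, bf a b = true → bf b a = false)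
    (x : α) (t : List α) (hp : t.Pairwise (fun a b => bf b a = false)) :
    (PySem.List.insertBy bf x t).Pairwise (fun a b => bf b a = false) := by
  have hdrop : ∀ e ∈ t.dropWhile (fun a => !bf x a), bf x e = true :=
    dropWhile_all_bf bf h4 x t hp
  rw [insertBy_eq_takeWhile]
  have hp' := hp
  rw [← List.takeWhile_append_dropWhile (p := fun a => !bf x a) (l := t),
      List.pairwise_append] at hp'
  obtain ⟨hp1, hp2, hcross⟩ := hp'
  rw [List.pairwise_append]
  refine ⟨hp1, ?_, ?_⟩
  · rw [List.pairwise_cons]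
    exact ⟨fun e he => hA _ _ (hdrop e he), hp2⟩
  · intro a ha b hb
    rcases List.mem_cons.mp hb with rfl | hb
    · simpa using List.mem_takeWhile_imp ha
    · exact hcross a ha b hb

theorem foldl_insertBy_pairwise {α : Type} (bf : α → α → Bool)
    (h4 : ∀ a b c, bf a b = true → bf c b = false → bf a c = true)
    (hA : ∀ a b, bf a b = true → bf b a = false)
    (l : List α) :
    (l.foldl (fun acc x => PySem.List.insertBy bf x acc) []).Pairwise
      (fun a b => bf b a = false) := by
  suffices h : ∀ t : List α, t.Pairwise (fun a b => bf b a = false) →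
      (l.foldl (fun acc x => PySem.List.insertBy bf x acc) t).Pairwise (fun a b => bf b a = false) from
    h [] (by simp)
  induction l with
  | nil => intro t ht; simpa using ht
  | cons y ys ih =>
    intro t ht
    exact ih _ (insertBy_pairwise bf h4 hA y t ht)

theorem sweepB_end (e : PvEv) (he : e.2.1 = 1) (cl : List (List PvR)) (cur : List PvR) (d : Int) :
    sweepB (cl, cur, d) e = if d - 1 = 0 then (cl ++ [cur], [], d - 1) else (cl, cur, d - 1) := by
  simp [sweepB, he]

-- run over end events only
theorem sweep_endrun : ∀ (B : List PvEv), (∀ e ∈ B, e.2.1 = 1) →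
    ∀ (cl : List (List PvR)) (cur : List PvR) (d : Int),
    B.foldl sweepB (cl, cur, d) =
      if 0 < d ∧ d ≤ (B.length : Int) then (cl ++ [cur], [], d - B.length)
      else (cl, cur, d - B.length) := by
  intro B
  induction B with
  | nil => intro _ cl cur d; simp
  | cons e es ih =>
    intro hB cl cur d
    have he : e.2.1 = 1 := hB e (by simp)
    have hes : ∀ e ∈ es, e.2.1 = 1 := fun e he => hB e (by simp [he])
    rw [List.foldl_cons, sweepB_end e he]
    by_cases hd : d - 1 = 0
    · rw [if_pos hd, ih hes]
      rw [if_neg (by rw [hd]; simp), if_pos (by constructor <;> [omega; (simp only [List.length_cons]; push_cast; omega)])]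
      simp only [List.length_cons, hd, Prod.mk.injEq]
      refine ⟨trivial, trivial, by push_cast; omega⟩
    · rw [if_neg hd, ih hes]
      simp only [List.length_cons]
      by_cases hc : 0 < d - 1 ∧ d - 1 ≤ (es.length : Int)
      · rw [if_pos hc, if_pos (by push_cast at hc ⊢; omega)]
        simp only [Prod.mk.injEq]
        refine ⟨trivial, trivial, by push_cast; omega⟩
      · rw [if_neg hc, if_neg (by push_cast at hc ⊢; omega)]
        simp only [Prod.mk.injEq]
        refine ⟨trivial, trivial, by push_cast; omega⟩

theorem sweepB_acc_step (e : PvEv) (cl : List (List PvR)) (cur : List PvR) (d : Int) :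
    sweepB (cl, cur, d) e = (cl ++ (sweepB ([], cur, d) e).1, (sweepB ([], cur, d) e).2) := by
  simp only [sweepB]
  split_ifs <;> simp

-- the clusters component only grows; factor the accumulator out
theorem sweep_acc : ∀ (E : List PvEv) (cl : List (List PvR)) (cur : List PvR) (d : Int),
    E.foldl sweepB (cl, cur, d) =
      ((cl ++ (E.foldl sweepB ([], cur, d)).1, (E.foldl sweepB ([], cur, d)).2)) := by
  intro E
  induction E with
  | nil => intro cl cur d; simp
  | cons e es ih =>
    intro cl cur d
    rw [List.foldl_cons, List.foldl_cons, sweepB_acc_step e cl cur d]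
    rcases h1 : (sweepB ([], cur, d) e) with ⟨c1, u1, d1⟩
    rw [ih (cl ++ c1) u1 d1, ih c1 u1 d1]
    simp

-- ===== events and clusters =====
def evb (r : PvR) : List PvEv :=
  if r.2.2.1 ≤ r.2.2.2.1 then [(r.2.2.1, 0, r), (r.2.2.2.1, 1, r)] else [(r.2.2.1, -1, r)]

def evts (m : List PvR) : List PvEv := m.flatMap evb

def sortE (l : List PvEv) : List PvEv :=
  l.foldl (fun acc e => PySem.List.insertBy bfE e acc) []

def swrun (E : List PvEv) : List (List PvR) × List PvR × Int :=
  E.foldl sweepB ([], [], 0)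

-- shape of a single record's events
theorem evb_cases (r : PvR) (e : PvEv) (he : e ∈ evb r) :
    (r.2.2.1 ≤ r.2.2.2.1 ∧ (e = (r.2.2.1, 0, r) ∨ e = (r.2.2.2.1, 1, r))) ∨
    (¬ r.2.2.1 ≤ r.2.2.2.1 ∧ e = (r.2.2.1, -1, r)) := by
  unfold evb at he
  split at he <;> simp_all

-- bf arithmetic
theorem bfE_true_iff (a b : PvEv) : bfE a b = true ↔ (a.1 < b.1 ∨ (¬ b.1 < a.1 ∧ a.2.1 < b.2.1)) := by
  simp [bfE]
theorem bfE_false_iff (a b : PvEv) : bfE a b = false ↔ ¬ (a.1 < b.1 ∨ (¬ b.1 < a.1 ∧ a.2.1 < b.2.1)) := by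
  rw [← bfE_true_iff]; simp
theorem bfR_true_iff (a b : PvR) : bfR a b = true ↔ (a.2.2.1 < b.2.2.1 ∨ (¬ b.2.2.1 < a.2.2.1 ∧ a.2.2.2.1 < b.2.2.2.1)) := by
  simp [bfR]
theorem bfR_false_iff (a b : PvR) : bfR a b = false ↔ ¬ (a.2.2.1 < b.2.2.1 ∨ (¬ b.2.2.1 < a.2.2.1 ∧ a.2.2.2.1 < b.2.2.2.1)) := by
  rw [← bfR_true_iff]; simp

theorem bfE_h4 : ∀ a b c : PvEv, bfE a b = true → bfE c b = false → bfE a c = true := by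
  intro a b c h1 h2
  rw [bfE_true_iff] at h1 ⊢; rw [bfE_false_iff] at h2; omega
theorem bfE_asym : ∀ a b : PvEv, bfE a b = true → bfE b a = false := by
  intro a b h; rw [bfE_true_iff] at h; rw [bfE_false_iff]; omega
theorem bfR_h4 : ∀ a b c : PvR, bfR a b = true → bfR c b = false → bfR a c = true := by
  intro a b c h1 h2
  rw [bfR_true_iff] at h1 ⊢; rw [bfR_false_iff] at h2; omega
theorem bfR_asym : ∀ a b : PvR, bfR a b = true → bfR b a = false := by
  intro a b h; rw [bfR_true_iff] at h; rw [bfR_false_iff]; omega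
-- transitivity of "not before" (totality of ≤)
theorem bfE_negtrans : ∀ a b c : PvEv, bfE b a = false → bfE c b = false → bfE c a = false := by
  intro a b c h1 h2
  rw [bfE_false_iff] at h1 h2 ⊢; omega

-- the running maximum of ends, as growA computes it
def pmf (x : PvR) (c : List PvR) : Int :=
  c.foldl (fun e z => if z.2.2.2.1 > e then z.2.2.2.1 else e) x.2.2.2.1

theorem pmf_nil (x : PvR) : pmf x [] = x.2.2.2.1 := rfl

theorem pmf_snoc (x : PvR) (c : List PvR) (y : PvR) :
    pmf x (c ++ [y]) = if y.2.2.2.1 > pmf x c then y.2.2.2.1 else pmf x c := by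
  unfold pmf; rw [List.foldl_append]; rfl

theorem pmf_snoc_ge (x : PvR) (c : List PvR) (y : PvR) : pmf x c ≤ pmf x (c ++ [y]) := by
  rw [pmf_snoc]; split <;> omega

-- A's cluster shape: built by snoc-ing records whose start reaches the running max end,
-- in sorted (start, end) order
inductive IsClus : PvR → List PvR → Prop
  | nil (x : PvR) : IsClus x []
  | snoc (x : PvR) (c : List PvR) (y : PvR) :
      IsClus x c → y.2.2.1 ≤ pmf x c → (∀ z ∈ x :: c, bfR y z = false) → IsClus x (c ++ [y])

theorem isClus_reg (x : PvR) (c : List PvR) (h : IsClus x c) (hne : c ≠ []) :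
    x.2.2.1 ≤ x.2.2.2.1 := by
  induction h with
  | nil => exact absurd rfl hne
  | snoc c y hc hst hall ih =>
    rcases List.eq_nil_or_concat' c with rfl | ⟨c', z, rfl⟩
    · have hx := hall x (by simp)
      rw [bfR_false_iff] at hx
      rw [pmf_nil] at hst
      omega
    · exact ih (by simp)

theorem isClus_mem_le (x : PvR) (c : List PvR) (h : IsClus x c) (hreg : x.2.2.1 ≤ x.2.2.2.1) :
    ∀ z ∈ x :: c, z.2.2.1 ≤ pmf x c ∧ z.2.2.2.1 ≤ pmf x c := by
  induction h with
  | nil => intro z hz; rw [List.mem_singleton] at hz; subst hz; rw [pmf_nil]; omega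
  | snoc c y hc hst hall ih =>
    intro z hz
    have hmono := pmf_snoc_ge x c y
    rcases List.mem_cons.mp hz with rfl | hz'
    · have := ih z (by simp); omega
    · rcases List.mem_append.mp hz' with hz'' | hz''
      · have := ih z (by simp [hz'']); omega
      · rw [List.mem_singleton] at hz''; subst hz''
        rw [pmf_snoc]
        split <;> omega

-- the running max end is attained by a regular member
theorem isClus_pm_attained (x : PvR) (c : List PvR) (h : IsClus x c)
    (hreg : x.2.2.1 ≤ x.2.2.2.1) :
    ∃ z ∈ x :: c, z.2.2.2.1 = pmf x c ∧ z.2.2.1 ≤ z.2.2.2.1 := by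
  induction h with
  | nil => exact ⟨x, by simp, by rw [pmf_nil], hreg⟩
  | snoc c y hc hst hall ih =>
    rw [pmf_snoc]
    by_cases hy : y.2.2.2.1 > pmf x c
    · exact ⟨y, by simp, by rw [if_pos hy], by omega⟩
    · obtain ⟨z, hz, hz1, hz2⟩ := ih
      refine ⟨z, ?_, by rw [if_neg hy]; exact hz1, hz2⟩
      rcases List.mem_cons.mp hz with rfl | hz' <;> simp_all

theorem insertBy_nil {α : Type} (bf : α → α → Bool) (x : α) :
    PySem.List.insertBy bf x [] = [x] := rfl

theorem insertBy_singleton_false {α : Type} (bf : α → α → Bool) (x a : α) (h : bf x a = false) :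
    PySem.List.insertBy bf x [a] = [a, x] := by
  have := insertBy_append_left bf x [a] [] (by simpa using h)
  simpa using this

-- the sweep key of y's start event (typ 0 if regular, -1 if degenerate)
def syv (y : PvR) : PvEv := (y.2.2.1, if y.2.2.1 ≤ y.2.2.2.1 then 0 else -1, y)

-- in sorted (start, end) order, y's start event key is ≥ every non-end event key of
-- records z that sort before y
theorem startkey (y z : PvR) (hz : bfR y z = false) (e : PvEv) (he : e ∈ evb z)
    (hend : e.2.1 ≠ 1) : bfE (syv y) e = false := by
  rw [bfR_false_iff] at hz
  rcases evb_cases z e he with ⟨hzreg, he1 | he1⟩ | ⟨hzdeg, he1⟩ <;> subst he1 <;>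
    [skip; (exact absurd rfl hend); skip] <;>
  · rw [bfE_false_iff]
    unfold syv
    split_ifs <;> simp only <;> omega

theorem mem_sortE (l : List PvEv) (e : PvEv) : e ∈ sortE l ↔ e ∈ l := by
  unfold sortE
  rw [mem_foldl_insertBy]
  simp

theorem sortE_pairwise (l : List PvEv) : (sortE l).Pairwise (fun a b => bfE b a = false) :=
  foldl_insertBy_pairwise bfE bfE_h4 bfE_asym l

theorem evts_append (a b : List PvR) : evts (a ++ b) = evts a ++ evts b := by
  unfold evts; rw [List.flatMap_append]

theorem sortE_append_evb (m : List PvR) (y : PvR) :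
    sortE (evts (m ++ [y])) = (evb y).foldl (fun acc e => PySem.List.insertBy bfE e acc) (sortE (evts m)) := by
  unfold sortE evts
  rw [List.flatMap_append, List.foldl_append]
  simp

theorem append_singleton_eq_singleton {α : Type} (s : List α) (a b : α)
    (h : s ++ [a] = [b]) : s = [] ∧ a = b := by
  cases s with
  | nil => simpa using h
  | cons x t =>
    simp only [List.cons_append, List.cons.injEq] at h
    exact absurd h.2 (by simp)

-- cluster-run: sweeping the sorted events of one A-cluster emits exactly that cluster
theorem cluster_run (x : PvR) (c : List PvR) (h : IsClus x c)
    (hx : c = [] ∨ x.2.2.1 ≤ x.2.2.2.1) :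
    swrun (sortE (evts (x :: c))) = ([x :: c], [], 0) := by
  induction h with
  | nil =>
    by_cases hr : x.2.2.1 ≤ x.2.2.2.1
    · have : sortE (evts [x]) = [(x.2.2.1, 0, x), (x.2.2.2.1, 1, x)] := by
        unfold sortE evts evb
        simp only [List.flatMap_cons, List.flatMap_nil, List.append_nil, if_pos hr,
          List.foldl_cons, List.foldl_nil]
        rw [insertBy_nil, insertBy_singleton_false]
        rw [bfE_false_iff]; simp only; omega
      rw [this]
      unfold swrun
      simp only [List.foldl_cons, List.foldl_nil, sweepB]
      norm_num
    · have : sortE (evts [x]) = [(x.2.2.1, -1, x)] := by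
        unfold sortE evts evb
        simp only [List.flatMap_cons, List.flatMap_nil, List.append_nil, if_neg hr,
          List.foldl_cons, List.foldl_nil]
        exact insertBy_nil _ _
      rw [this]
      unfold swrun
      simp only [List.foldl_cons, List.foldl_nil, sweepB]
      norm_num
  | snoc c y hc hst hall ih =>
    -- x is regular
    have hxreg : x.2.2.1 ≤ x.2.2.2.1 := by
      rcases List.eq_nil_or_concat' c with rfl | ⟨c', z, rfl⟩
      · have hx' := hall x (by simp)
        rw [bfR_false_iff] at hx'
        rw [pmf_nil] at hst
        omega
      · exact isClus_reg x _ hc (by simp)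
    have hrun : swrun (sortE (evts (x :: c))) = ([x :: c], [], 0) := ih (Or.inr hxreg)
    set m : List PvR := x :: c with hm
    set E : List PvEv := sortE (evts m) with hE
    set T : List PvEv := E.takeWhile (fun a => !bfE (syv y) a) with hT
    set D : List PvEv := E.dropWhile (fun a => !bfE (syv y) a) with hD
    have hTD : T ++ D = E := List.takeWhile_append_dropWhile
    have hmemE : ∀ e ∈ E, ∃ z ∈ m, e ∈ evb z := by
      intro e he
      rw [hE, mem_sortE] at he
      exact List.mem_flatMap.mp he
    have hDbf : ∀ e ∈ D, bfE (syv y) e = true :=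
      dropWhile_all_bf bfE bfE_h4 (syv y) E (sortE_pairwise _)
    have hDend : ∀ e ∈ D, e.2.1 = 1 := by
      intro e heD
      have heE : e ∈ E := by rw [← hTD]; exact List.mem_append_right _ heD
      obtain ⟨z, hzm, hez⟩ := hmemE e heE
      by_contra hne
      have := startkey y z (hall z hzm) e hez hne
      rw [hDbf e heD] at this
      exact absurd this (by simp)
    have hTkeep : ∀ a ∈ T, bfE (syv y) a = false := by
      intro a ha
      have := List.mem_takeWhile_imp ha
      simpa using this
    have hDne : D ≠ [] := by
      obtain ⟨z, hzm, hz1, hz2⟩ := isClus_pm_attained x c hc hxreg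
      have hez : ((z.2.2.2.1 : Int), (1 : Int), z) ∈ evb z := by
        unfold evb; rw [if_pos hz2]; simp
      have heE : ((z.2.2.2.1 : Int), (1 : Int), z) ∈ E := by
        rw [hE, mem_sortE]
        exact List.mem_flatMap.mpr ⟨z, hzm, hez⟩
      have hbf : bfE (syv y) (z.2.2.2.1, 1, z) = true := by
        rw [bfE_true_iff]
        unfold syv
        rw [hz1]
        split_ifs <;> simp only <;> omega
      intro hDnil
      have : ((z.2.2.2.1 : Int), (1 : Int), z) ∈ T := by
        rw [← hTD] at heE
        rcases List.mem_append.mp heE with h' | h'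
        · exact h'
        · rw [hDnil] at h'; simp at h'
      rw [hTkeep _ this] at hbf
      exact absurd hbf (by simp)
    -- invert the run of E to get the state after T
    have hsplit_run : List.foldl sweepB (List.foldl sweepB ([], [], 0) T) D = ([m], [], 0) := by
      rw [← List.foldl_append, hTD]
      exact hrun
    rcases hs1 : List.foldl sweepB (([] : List (List PvR)), ([] : List PvR), (0 : Int)) T with ⟨c0, u0, d0⟩
    rw [hs1] at hsplit_run
    rw [sweep_endrun D hDend c0 u0 d0] at hsplit_run
    have hDlen : 0 < (D.length : Int) := by
      have := List.length_pos_iff.mpr hDne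
      exact_mod_cast this
    have hs1v : c0 = [] ∧ u0 = m ∧ d0 = (D.length : Int) := by
      by_cases hcond : 0 < d0 ∧ d0 ≤ (D.length : Int)
      · rw [if_pos hcond] at hsplit_run
        have h1 := congrArg Prod.fst hsplit_run
        have h3 := congrArg (fun p => p.2.2) hsplit_run
        simp only at h1 h3
        obtain ⟨hc0, hu0⟩ := append_singleton_eq_singleton c0 u0 m h1
        exact ⟨hc0, hu0, by omega⟩
      · rw [if_neg hcond] at hsplit_run
        have h3 := congrArg (fun p => p.2.2) hsplit_run
        simp only at h3
        exact absurd ⟨by omega, by omega⟩ hcond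
    obtain ⟨rfl, rfl, rfl⟩ := hs1v
    have hconsapp : x :: (c ++ [y]) = m ++ [y] := by rw [hm]; simp
    rw [hconsapp, sortE_append_evb m y]
    rw [← hE]
    by_cases hyreg : y.2.2.1 ≤ y.2.2.2.1
    · -- y is a regular interval: insert its start and end events
      have hsy : syv y = (y.2.2.1, 0, y) := by unfold syv; rw [if_pos hyreg]
      have hevby : evb y = [(y.2.2.1, 0, y), (y.2.2.2.1, 1, y)] := by
        unfold evb; rw [if_pos hyreg]
      rw [hevby]
      simp only [List.foldl_cons, List.foldl_nil]
      rw [← hsy, insertBy_eq_takeWhile bfE (syv y) E, ← hT, ← hD]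
      have hTsy : ∀ a ∈ T ++ [syv y], bfE (y.2.2.2.1, 1, y) a = false := by
        intro a ha
        have heysy : bfE (y.2.2.2.1, 1, y) (syv y) = false := by
          rw [hsy, bfE_false_iff]; simp only; omega
        rcases List.mem_append.mp ha with ha' | ha'
        · exact bfE_negtrans a (syv y) _ (hTkeep a ha') heysy
        · rw [List.mem_singleton] at ha'; rw [ha']; exact heysy
      have hsplit2 : T ++ syv y :: D = (T ++ [syv y]) ++ D := by simp
      rw [hsplit2, insertBy_append_left bfE _ _ D hTsy, insertBy_eq_takeWhile bfE _ D]
      set B1 := D.takeWhile (fun a => !bfE (y.2.2.2.1, 1, y) a) with hB1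
      set B2 := D.dropWhile (fun a => !bfE (y.2.2.2.1, 1, y) a) with hB2
      unfold swrun
      rw [List.foldl_append, List.foldl_append]
      have hrunT : List.foldl sweepB ([], [], 0) (T ++ [syv y]) = ([], m ++ [y], (D.length : Int) + 1) := by
        rw [List.foldl_append, hs1]
        rw [hsy]
        simp [sweepB]
      rw [hrunT]
      have hB1B2 : B1 ++ B2 = D := by rw [hB1, hB2]; exact List.takeWhile_append_dropWhile
      have hlen12 : B1.length + B2.length = D.length := by
        rw [← List.length_append, hB1B2]
      have hB1end : ∀ e ∈ B1, e.2.1 = 1 :=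
        fun e he => hDend e ((List.takeWhile_sublist _).mem he)
      have hB2end : ∀ e ∈ (y.2.2.2.1, (1:Int), y) :: B2, e.2.1 = 1 := by
        intro e he
        rcases List.mem_cons.mp he with rfl | he'
        · rfl
        · exact hDend e ((List.dropWhile_sublist _).mem he')
      rw [sweep_endrun _ hB1end]
      rw [if_neg (by omega)]
      rw [sweep_endrun _ hB2end]
      rw [if_pos (by
        simp only [List.length_cons]
        push_cast
        omega)]
      simp only [List.length_cons, List.nil_append, Prod.mk.injEq]
      refine ⟨by simp, by simp, ?_⟩
      push_cast
      omega
    · -- y is degenerate (end < start): a single point event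
      have hsy : syv y = (y.2.2.1, -1, y) := by unfold syv; rw [if_neg hyreg]
      have hevby : evb y = [(y.2.2.1, -1, y)] := by unfold evb; rw [if_neg hyreg]
      rw [hevby]
      simp only [List.foldl_cons, List.foldl_nil]
      rw [← hsy, insertBy_eq_takeWhile bfE (syv y) E, ← hT, ← hD]
      unfold swrun
      rw [List.foldl_append, hs1]
      rw [List.foldl_cons]
      have hstep : sweepB ([], m, (D.length : Int)) (syv y) = ([], m ++ [y], (D.length : Int)) := by
        rw [hsy]
        simp only [sweepB]
        rw [if_pos hDlen]
        simp
      rw [hstep, sweep_endrun D hDend]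
      rw [if_pos ⟨hDlen, le_refl _⟩]
      simp

-- growA produces an IsClus cluster together with the running max end and a far remainder
theorem growA_isClus : ∀ (rs : List PvR) (x : PvR) (c : List PvR),
    IsClus x c → rs.Pairwise (fun a b => bfR b a = false) →
    (∀ z ∈ x :: c, ∀ w ∈ rs, bfR w z = false) →
    ∃ t, growA rs (pmf x c) (x :: c) = (x :: (c ++ t), pmf x (c ++ t), rs.drop t.length) ∧
      rs = t ++ rs.drop t.length ∧ IsClus x (c ++ t) ∧
      (rs.drop t.length = [] ∨ ∃ h tl, rs.drop t.length = h :: tl ∧ pmf x (c ++ t) < h.2.2.1) := by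
  intro rs
  induction rs with
  | nil =>
    intro x c hclus _ _
    exact ⟨[], by simp [growA], by simp, by simpa using hclus, Or.inl (by simp)⟩
  | cons y ys ih =>
    intro x c hclus hpw hcross
    by_cases hy : y.2.2.1 ≤ pmf x c
    · have hclus' : IsClus x (c ++ [y]) :=
        IsClus.snoc x c y hclus hy (fun z hz => hcross z hz y (by simp))
      have hpw' : ys.Pairwise (fun a b => bfR b a = false) := (List.pairwise_cons.mp hpw).2
      have hcross' : ∀ z ∈ x :: (c ++ [y]), ∀ w ∈ ys, bfR w z = false := by
        intro z hz w hw
        rcases List.mem_cons.mp hz with rfl | hz'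
        · exact hcross z (by simp) w (by simp [hw])
        · rcases List.mem_append.mp hz' with hz'' | hz''
          · exact hcross z (by simp [hz'']) w (by simp [hw])
          · rw [List.mem_singleton] at hz''; subst hz''
            exact (List.pairwise_cons.mp hpw).1 w hw
      obtain ⟨t, hg, hsplit, hcl, hrest⟩ := ih x (c ++ [y]) hclus' hpw' hcross'
      refine ⟨y :: t, ?_, ?_, ?_, ?_⟩
      · simp only [growA, if_pos hy]
        have hpm : (if y.2.2.2.1 > pmf x c then y.2.2.2.1 else pmf x c) = pmf x (c ++ [y]) := by
          rw [pmf_snoc]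
        rw [hpm]
        have hacc : (x :: c) ++ [y] = x :: (c ++ [y]) := by simp
        rw [hacc, hg]
        simp [List.append_assoc]
      · simpa [List.append_assoc] using congrArg (fun l => y :: l) hsplit
      · simpa [List.append_assoc] using hcl
      · simpa [List.append_assoc] using hrest
    · refine ⟨[], ?_, by simp, by simpa using hclus, ?_⟩
      · simp only [growA, if_neg hy]
        simp
      · exact Or.inr ⟨y, ys, by simp, by rw [List.append_nil]; omega⟩

def rawM (rs : List PvR) : List (List PvR) :=
  match rs with
  | [] => []
  | x :: xs =>
    let g := growA xs x.2.2.2.1 [x]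
    g.1 :: rawM g.2.2
termination_by rs.length
decreasing_by
  simpa using Nat.lt_succ_of_le (growA_rest_length xs x.2.2.2.1 [x])

theorem mergeA_eq_rawM : ∀ rs : List PvR,
    mergeA rs = (rawM rs).map (fun c => PySem.List.sorted c (fun r => r.1)) := by
  intro rs
  induction rs using mergeA.induct with
  | case1 => simp [mergeA, rawM]
  | case2 x xs g ih =>
    rw [mergeA, rawM]
    simp only [List.map_cons]
    exact congrArg _ ih
-- per-chromosome: the sweep over sorted events equals A's merge loop
theorem main_chrom : ∀ (n : Nat) (rs : List PvR), rs.length ≤ n →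
    rs.Pairwise (fun a b => bfR b a = false) →
    swrun (sortE (evts rs)) = (rawM rs, [], 0) := by
  intro n
  induction n with
  | zero =>
    intro rs hlen _
    rw [List.length_eq_zero_iff.mp (Nat.le_zero.mp hlen)]
    simp [swrun, sortE, evts, rawM]
  | succ n ih =>
    intro rs hlen hpw
    match rs with
    | [] => simp [swrun, sortE, evts, rawM]
    | x :: xs =>
      have hpwxs : xs.Pairwise (fun a b => bfR b a = false) := (List.pairwise_cons.mp hpw).2
      have hhead : ∀ w ∈ xs, bfR w x = false := (List.pairwise_cons.mp hpw).1
      obtain ⟨t, hg, hsplit, hcl, hrest⟩ :=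
        growA_isClus xs x [] (IsClus.nil x) hpwxs (by
          intro z hz w hw
          rw [List.mem_singleton] at hz; subst hz
          exact hhead w hw)
      rw [List.nil_append] at hg hcl hrest
      set R := xs.drop t.length with hR
      have hpwR : R.Pairwise (fun a b => bfR b a = false) := by
        rw [hsplit] at hpwxs
        exact (List.pairwise_append.mp hpwxs).2.1
      have hRlen : R.length ≤ n := by
        have := congrArg List.length hsplit
        simp only [List.length_append] at this
        simp only [List.length_cons] at hlen
        omega
      have hxt : x :: xs = (x :: t) ++ R := by
        rw [hsplit]; simp
      have hsidecond : t = [] ∨ x.2.2.1 ≤ x.2.2.2.1 := by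
        by_cases hxreg : x.2.2.1 ≤ x.2.2.2.1
        · exact Or.inr hxreg
        · left
          by_contra hne
          exact hxreg (isClus_reg x t hcl hne)
      -- cross condition: every event of the remainder R has key ≥ every event of the cluster
      have hcross : ∀ b ∈ evts R, ∀ a ∈ evts (x :: t), bfE b a = false := by
        intro b hb a ha
        obtain ⟨w, hwR, hbw⟩ := List.mem_flatMap.mp hb
        obtain ⟨z, hzC, haz⟩ := List.mem_flatMap.mp ha
        have hbw1 : w.2.2.1 ≤ b.1 ∧ -1 ≤ b.2.1 := by
          rcases evb_cases w b hbw with ⟨hr, h1 | h1⟩ | ⟨hr, h1⟩ <;> subst h1 <;>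
            simp only <;> omega
        by_cases hxreg : x.2.2.1 ≤ x.2.2.2.1
        · have hstw : pmf x t < w.2.2.1 := by
            rcases hrest with hnil | ⟨h, tl, hRht, hMlt⟩
            · rw [hnil] at hwR; simp at hwR
            · rw [hRht] at hwR
              rcases List.mem_cons.mp hwR with rfl | hw'
              · omega
              · have hwh : bfR w h = false := by
                  rw [hRht] at hpwR
                  exact (List.pairwise_cons.mp hpwR).1 w hw'
                rw [bfR_false_iff] at hwh
                omega
          have hmem := isClus_mem_le x t hcl hxreg z hzC
          have ha1 : a.1 ≤ pmf x t := by
            rcases evb_cases z a haz with ⟨hr, h1 | h1⟩ | ⟨hr, h1⟩ <;> subst h1 <;>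
              simp only <;> omega
          rw [bfE_false_iff]
          omega
        · have ht : t = [] := hsidecond.resolve_right hxreg
          subst ht
          have hz : z = x := by simpa using hzC
          subst hz
          have hax : a = (z.2.2.1, -1, z) := by
            rcases evb_cases z a haz with ⟨hr, _⟩ | ⟨hr, h1⟩
            · exact absurd hr hxreg
            · exact h1
          have hsw : z.2.2.1 ≤ w.2.2.1 := by
            have hwx : bfR w z = false := by
              apply hhead
              rw [hsplit]
              simpa using hwR
            rw [bfR_false_iff] at hwx
            omega
          rw [bfE_false_iff, hax]
          simp only
          omega
      rw [hxt]
      unfold swrun sortE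
      rw [evts_append]
      rw [sortFold_append bfE _ _ hcross, List.foldl_append]
      have hclrun := cluster_run x t hcl hsidecond
      unfold swrun sortE at hclrun
      rw [hclrun]
      have hIH := ih R hRlen hpwR
      unfold swrun sortE at hIH
      rw [sweep_acc, hIH]
      have hraw : rawM (x :: (t ++ R)) = (x :: t) :: rawM R := by
        rw [← hsplit]
        rw [rawM]
        have hg' : growA xs x.2.2.2.1 [x] = (x :: t, pmf x t, R) := by
          rw [← pmf_nil x]; exact hg
        rw [hg']
      rw [show x :: t ++ R = x :: (t ++ R) from rfl, hraw]
      simp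



-- B's event-building loop builds exactly the flat event list
theorem eventsB_eq_evts (rs : List PvR) :
    rs.foldl (fun acc r =>
      if r.2.2.1 ≤ r.2.2.2.1 then acc ++ [(r.2.2.1, 0, r)] ++ [(r.2.2.2.1, 1, r)]
      else acc ++ [(r.2.2.1, -1, r)]) [] = evts rs := by
  suffices h : ∀ acc : List PvEv, rs.foldl (fun acc r =>
      if r.2.2.1 ≤ r.2.2.2.1 then acc ++ [(r.2.2.1, 0, r)] ++ [(r.2.2.2.1, 1, r)]
      else acc ++ [(r.2.2.1, -1, r)]) acc = acc ++ evts rs from by simpa using h []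
  induction rs with
  | nil => intro acc; simp [evts]
  | cons r rest ih =>
    intro acc
    rw [List.foldl_cons, ih]
    have : (if r.2.2.1 ≤ r.2.2.2.1 then acc ++ [(r.2.2.1, 0, r)] ++ [(r.2.2.2.1, 1, r)]
        else acc ++ [(r.2.2.1, -1, r)]) = acc ++ evb r := by
      unfold evb; split <;> simp
    rw [this]
    unfold evts
    simp

-- per-chromosome: B's sweep equals the raw clusters of A's merge loop
theorem chromB_eq_rawM (recs : List PvR) :
    chromB recs = rawM (PySem.List.sorted2 recs (fun r => r.2.2.1) (fun r => r.2.2.2.1)) := by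
  simp only [chromB]
  rw [eventsB_eq_evts]
  have hsorted_eq : PySem.List.sorted2 recs (fun r => r.2.2.1) (fun r => r.2.2.2.1) =
      recs.foldl (fun acc x => PySem.List.insertBy bfR x acc) [] := rfl
  have hpw : (PySem.List.sorted2 recs (fun r => r.2.2.1) (fun r => r.2.2.2.1)).Pairwise
      (fun a b => bfR b a = false) := by
    rw [hsorted_eq]
    exact foldl_insertBy_pairwise bfR bfR_h4 bfR_asym recs
  have h := main_chrom _ _ (le_refl _) hpw
  have hE : PySem.List.sorted2 (evts (PySem.List.sorted2 recs (fun r => r.2.2.1) (fun r => r.2.2.2.1)))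
      (fun e => e.1) (fun e => e.2.1) = sortE (evts (PySem.List.sorted2 recs (fun r => r.2.2.1) (fun r => r.2.2.2.1))) := rfl
  rw [hE]
  unfold swrun at h
  rw [h]

-- the grouping dict's items: first-seen chromosomes with their filtered record lists
theorem grouping_items (records : List PvR) :
    (records.foldl (fun d r => d.modify r.2.1 [] (fun l => l ++ [r])) PySem.Dict.empty).items =
      (PySem.List.dedup (records.map (fun r => r.2.1))).map
        (fun ch => (ch, records.filter (fun r => r.2.1 == ch))) := by
  set d := records.foldl (fun d r => d.modify r.2.1 [] (fun l => l ++ [r])) PySem.Dict.empty with hd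
  have hkeys : d.keys = PySem.List.dedup (records.map (fun r => r.2.1)) := by
    rw [hd, PySem.Dict.keys_foldl_modify_key records (fun r => r.2.1) [] (fun _ r => fun l => l ++ [r])]
    rw [PySem.List.dedup_eq_ofList, PySem.Set.ofList_eq_foldl]
    rfl
  have hnodup : d.keys.Nodup := by
    rw [hd]
    exact PySem.Dict.nodup_keys_foldl_modify_key records (fun r => r.2.1) [] _ _ PySem.Dict.nodup_keys_empty
  have hgetD : ∀ ch, d.getD ch [] = records.filter (fun r => r.2.1 == ch) := by
    intro ch
    have hfold : d = (records.map (fun r => (r.2.1, r))).foldl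
        (fun d p => d.modify p.1 [] (fun l => l ++ [p.2])) PySem.Dict.empty := by
      rw [hd, List.foldl_map]
    rw [hfold, PySem.Dict.getD_foldl_modify_append, PySem.Dict.getD_empty]
    rw [List.filter_map]
    simp [Function.comp_def]
  rw [PySem.Dict.items_eq_map_keys d hnodup [], hkeys]
  apply List.map_congr_left
  intro ch _
  rw [hgetD ch]

theorem main_equiv (records : List (Int × String × Int × Int × String)) :
    cluster_by_chrom records = cluster_by_chrom_alt records := by
  simp only [cluster_by_chrom, cluster_by_chrom_alt]
  rw [grouping_items]
  rw [PySem.List.foldl_append_eq_flatMap, PySem.List.foldl_append_eq_flatMap]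
  rw [List.flatMap_map]
  simp only [List.nil_append]
  congr 1
  rw [List.map_flatMap]
  simp only [mergeA_eq_rawM, chromB_eq_rawM]

-- ===== VERDICT (by name: the statement is the Claim_ definition above) =====
theorem cluster_by_chrom_spec : Claim_equal_cluster_by_chrom := by
  intro records _
  unfold Spec_cluster_by_chrom
  exact main_equiv records
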